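-- pv_equiv track=rewrite | github.com/congwa/wechat-translate | listener_app/sidebar_tts.py | pick_preferred_tts_voice
-- ===== SOURCE A (Python) =====
-- PREFERRED_ENGLISH_TTS_VOICES = ("Microsoft Zira Desktop", "Microsoft David Desktop")
--
-- def pick_preferred_tts_voice(voices: list[dict[str, str]]) -> str:
--     if not voices:
--         return ""
--     names: dict[str, str] = {}
--     for voice in voices:
--         name = str(voice.get("name") or "").strip()
--         if name:
--             names[name.lower()] = name
--
--     for preferred in PREFERRED_ENGLISH_TTS_VOICES:
--         chosen = names.get(preferred.lower())
--         if chosen: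
--             return chosen
--
--     for voice in voices:
--         name = str(voice.get("name") or "").strip()
--         culture = str(voice.get("culture") or "").lower()
--         if name and culture.startswith("en"):
--             return name
--     return ""
-- ===== SOURCE B (Python) =====
-- def pick_preferred_tts_voice(voices: list[dict[str, str]]) -> str:
--     zira = david = english = None
--     for voice in voices:
--         name = str(voice.get("name") or "").strip()
--         low = name.lower()
--         if low == "microsoft zira desktop":
--             zira = name
--         elif low == "microsoft david desktop":
--             david = name
--         if english is None and name and str(voice.get("culture") or "").lower().startswith("en"):
--             english = name
--     return zira or david or english or ""
-- ===== Notes on version B (the rewrite author's own statement) =====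
-- stated objective: simpler
-- what changed: Replaces the name-index dict plus three passes (build index, probe the two preferred keys, rescan for an English-culture voice) by a single pass that keeps three variables (last Zira match, last David match, first English-culture name) and returns 'zira or david or english or ""'.
import Mathlib
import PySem

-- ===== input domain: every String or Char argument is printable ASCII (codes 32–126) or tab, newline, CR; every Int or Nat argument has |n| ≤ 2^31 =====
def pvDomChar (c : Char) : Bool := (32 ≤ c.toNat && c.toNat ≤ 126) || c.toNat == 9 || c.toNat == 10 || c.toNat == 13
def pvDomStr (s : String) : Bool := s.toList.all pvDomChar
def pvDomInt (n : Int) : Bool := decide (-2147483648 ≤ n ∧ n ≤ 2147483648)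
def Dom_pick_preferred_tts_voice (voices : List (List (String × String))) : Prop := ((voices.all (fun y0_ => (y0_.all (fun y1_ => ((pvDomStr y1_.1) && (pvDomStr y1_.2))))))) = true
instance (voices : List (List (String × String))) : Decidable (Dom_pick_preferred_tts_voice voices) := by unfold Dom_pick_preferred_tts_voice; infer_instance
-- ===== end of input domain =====

-- B replaces A's name-index dict and three passes by a single pass keeping three
-- variables (last Zira match, last David match, first English-culture name); objective: simpler.

-- shared helpers: `str(voice.get("name") or "").strip()` and `str(voice.get("culture") or "").lower()`
-- (dict.get = first match on the association list; `s or ""` is `s` for any string, so getD "" is exact)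
def pvName (voice : List (String × String)) : String :=
  PySem.Str.strip ((voice.lookup "name").getD "")

def pvCulture (voice : List (String × String)) : String :=
  PySem.Str.lower ((voice.lookup "culture").getD "")

-- ===== PORT A =====
def pvNamesDict (voices : List (List (String × String))) : PySem.Dict String String :=
  voices.foldl (fun d voice =>
    if pvName voice ≠ "" then d.insert (PySem.Str.lower (pvName voice)) (pvName voice) else d)
    PySem.Dict.empty

-- the `for preferred in PREFERRED_ENGLISH_TTS_VOICES` loop with its early return
def pvPreferredLookup (names : PySem.Dict String String) : List String → Option String
  | [] => none
  | p :: rest =>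
    match names.get? (PySem.Str.lower p) with
    | some chosen => if chosen ≠ "" then some chosen else pvPreferredLookup names rest
    | none => pvPreferredLookup names rest

-- the final `for voice in voices` loop with its early return
def pvFallback : List (List (String × String)) → String
  | [] => ""
  | voice :: rest =>
    let name := pvName voice
    let culture := pvCulture voice
    if name ≠ "" ∧ PySem.Str.startswith culture "en" then name else pvFallback rest

def pick_preferred_tts_voice (voices : List (List (String × String))) : String :=
  if voices = [] then ""
  else
    let names := pvNamesDict voices
    match pvPreferredLookup names ["Microsoft Zira Desktop", "Microsoft David Desktop"] with
    | some chosen => chosen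
    | none => pvFallback voices

-- ===== PORT B =====
def pvStepB (st : Option String × Option String × Option String)
    (voice : List (String × String)) : Option String × Option String × Option String :=
  let name := pvName voice
  let low := PySem.Str.lower name
  let z := if low = "microsoft zira desktop" then some name else st.1
  let d := if ¬ low = "microsoft zira desktop" ∧ low = "microsoft david desktop" then some name else st.2.1
  let e := if st.2.2 = none ∧ name ≠ "" ∧ PySem.Str.startswith (pvCulture voice) "en" then some name
           else st.2.2
  (z, d, e)

def pick_preferred_tts_voice_alt (voices : List (List (String × String))) : String :=
  let r := voices.foldl pvStepB (none, none, none)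
  -- `zira or david or english or ""`: each variable, when set, holds a non-empty name
  r.1.getD (r.2.1.getD (r.2.2.getD ""))

-- ===== PRECONDITION & SPEC =====
def Spec_pick_preferred_tts_voice (voices : List (List (String × String))) (out : String) : Prop := out = pick_preferred_tts_voice_alt voices
instance (voices : List (List (String × String))) (out : String) : Decidable (Spec_pick_preferred_tts_voice voices out) := by unfold Spec_pick_preferred_tts_voice; infer_instance

-- ===== CLAIM (what is proved, stated in full; the proofs are below) =====
def Claim_equal_pick_preferred_tts_voice : Prop := ∀ (voices : List (List (String × String))), Dom_pick_preferred_tts_voice voices → Spec_pick_preferred_tts_voice voices (pick_preferred_tts_voice voices)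

-- ===== LEMMAS AND PROOFS =====

-- the three independent components of B's fold
def pvZStep (z : Option String) (voice : List (String × String)) : Option String :=
  if PySem.Str.lower (pvName voice) = "microsoft zira desktop" then some (pvName voice) else z

def pvDStep (d : Option String) (voice : List (String × String)) : Option String :=
  if ¬ PySem.Str.lower (pvName voice) = "microsoft zira desktop" ∧
      PySem.Str.lower (pvName voice) = "microsoft david desktop" then some (pvName voice) else d

def pvEStep (e : Option String) (voice : List (String × String)) : Option String :=
  if e = none ∧ pvName voice ≠ "" ∧ PySem.Str.startswith (pvCulture voice) "en" then some (pvName voice)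
  else e

lemma foldB_split (voices : List (List (String × String)))
    (z0 d0 e0 : Option String) :
    voices.foldl pvStepB (z0, d0, e0) =
      (voices.foldl pvZStep z0, voices.foldl pvDStep d0, voices.foldl pvEStep e0) := by
  induction voices generalizing z0 d0 e0 with
  | nil => rfl
  | cons v rest ih =>
      simp only [List.foldl_cons]
      rw [show pvStepB (z0, d0, e0) v = (pvZStep z0 v, pvDStep d0 v, pvEStep e0 v) from rfl]
      exact ih _ _ _

-- lowering a non-empty preferred name forces the name itself non-empty
lemma pvName_ne_of_lower_eq {voice : List (String × String)} {k : String}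
    (hk : k ≠ "") (h : PySem.Str.lower (pvName voice) = k) : pvName voice ≠ "" := by
  intro h0
  rw [h0] at h
  exact hk (h ▸ rfl)

-- the dict built by A, looked up at key k, is the "last matching name" fold
lemma namesDict_get (voices : List (List (String × String)))
    (d0 : PySem.Dict String String) (k : String) :
    (voices.foldl (fun d voice =>
        if pvName voice ≠ "" then d.insert (PySem.Str.lower (pvName voice)) (pvName voice) else d)
        d0).get? k =
      voices.foldl (fun acc voice =>
        if PySem.Str.lower (pvName voice) = k ∧ pvName voice ≠ "" then some (pvName voice) else acc)
        (d0.get? k) := by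
  induction voices generalizing d0 with
  | nil => rfl
  | cons v rest ih =>
      have hstep : (if pvName v ≠ "" then
            d0.insert (PySem.Str.lower (pvName v)) (pvName v) else d0).get? k =
          (if PySem.Str.lower (pvName v) = k ∧ pvName v ≠ "" then some (pvName v)
            else d0.get? k) := by
        by_cases hn : pvName v = ""
        · rw [if_neg (fun h => h hn), if_neg (fun h => h.2 hn)]
        · rw [if_pos hn, PySem.Dict.get?_insert]
          by_cases hk : PySem.Str.lower (pvName v) = k
          · rw [if_pos hk.symm, if_pos ⟨hk, hn⟩]
          · rw [if_neg (fun h => hk h.symm), if_neg (fun h => hk h.1)]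
      simp only [List.foldl_cons]
      rw [ih, hstep]

lemma zira_eq (voices : List (List (String × String))) :
    (pvNamesDict voices).get? "microsoft zira desktop" = voices.foldl pvZStep none := by
  rw [pvNamesDict, namesDict_get]
  apply PySem.List.foldl_congr_mem
  intro acc v _
  rw [pvZStep]
  by_cases h : PySem.Str.lower (pvName v) = "microsoft zira desktop"
  · simp [h, pvName_ne_of_lower_eq (by decide) h]
  · simp [h]

lemma david_eq (voices : List (List (String × String))) :
    (pvNamesDict voices).get? "microsoft david desktop" = voices.foldl pvDStep none := by
  rw [pvNamesDict, namesDict_get]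
  apply PySem.List.foldl_congr_mem
  intro acc v _
  rw [pvDStep]
  by_cases h : PySem.Str.lower (pvName v) = "microsoft david desktop"
  · have hz : ¬ PySem.Str.lower (pvName v) = "microsoft zira desktop" := by
      rw [h]; decide
    simp [h, pvName_ne_of_lower_eq (by decide) h]
  · simp [h]

-- any value stored in the zira/david fold is non-empty
lemma zfold_ne_empty (voices : List (List (String × String))) :
    ∀ (z0 : Option String), (∀ s, z0 = some s → s ≠ "") →
      ∀ s, voices.foldl pvZStep z0 = some s → s ≠ "" := by
  induction voices with
  | nil => intro z0 h0 s hs; exact h0 s hs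
  | cons v rest ih =>
      intro z0 h0 s hs
      simp only [List.foldl_cons] at hs
      refine ih _ ?_ s hs
      intro t ht
      rw [pvZStep] at ht
      by_cases h : PySem.Str.lower (pvName v) = "microsoft zira desktop"
      · rw [if_pos h] at ht
        cases ht
        exact pvName_ne_of_lower_eq (by decide) h
      · rw [if_neg h] at ht
        exact h0 t ht

lemma dfold_ne_empty (voices : List (List (String × String))) :
    ∀ (d0 : Option String), (∀ s, d0 = some s → s ≠ "") →
      ∀ s, voices.foldl pvDStep d0 = some s → s ≠ "" := by
  induction voices with
  | nil => intro d0 h0 s hs; exact h0 s hs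
  | cons v rest ih =>
      intro d0 h0 s hs
      simp only [List.foldl_cons] at hs
      refine ih _ ?_ s hs
      intro t ht
      rw [pvDStep] at ht
      by_cases h : ¬ PySem.Str.lower (pvName v) = "microsoft zira desktop" ∧
          PySem.Str.lower (pvName v) = "microsoft david desktop"
      · rw [if_pos h] at ht
        cases ht
        exact pvName_ne_of_lower_eq (by decide) h.2
      · rw [if_neg h] at ht
        exact h0 t ht

lemma efold_some (voices : List (List (String × String))) (s : String) :
    voices.foldl pvEStep (some s) = some s := by
  induction voices with
  | nil => rfl
  | cons v rest ih => simp only [List.foldl_cons, pvEStep]; simp [ih]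

-- A's fallback scan is the `getD ""` of B's first-English fold
lemma fallback_eq (voices : List (List (String × String))) :
    pvFallback voices = (voices.foldl pvEStep none).getD "" := by
  induction voices with
  | nil => rfl
  | cons v rest ih =>
      simp only [pvFallback, List.foldl_cons]
      by_cases h : pvName v ≠ "" ∧ PySem.Str.startswith (pvCulture v) "en"
      · rw [if_pos h]
        have he : pvEStep none v = some (pvName v) := by
          rw [pvEStep, if_pos ⟨rfl, h.1, h.2⟩]
        rw [he, efold_some]
        rfl
      · rw [if_neg h]
        have he : pvEStep none v = none := by
          rw [pvEStep, if_neg]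
          rintro ⟨-, h1, h2⟩
          exact h ⟨h1, h2⟩
        rw [he]
        exact ih

-- ===== VERDICT (by name: the statement is the Claim_ definition above) =====
theorem pick_preferred_tts_voice_spec : Claim_equal_pick_preferred_tts_voice := by
  intro voices _
  show pick_preferred_tts_voice voices = pick_preferred_tts_voice_alt voices
  rw [pick_preferred_tts_voice, pick_preferred_tts_voice_alt]
  rw [foldB_split]
  by_cases hv : voices = []
  · subst hv; rfl
  · rw [if_neg hv]
    have hZ : PySem.Str.lower "Microsoft Zira Desktop" = "microsoft zira desktop" := by decide
    have hD : PySem.Str.lower "Microsoft David Desktop" = "microsoft david desktop" := by decide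
    simp only [pvPreferredLookup, hZ, hD, zira_eq, david_eq]
    cases hz : voices.foldl pvZStep none with
    | some s =>
        have hs : s ≠ "" := zfold_ne_empty voices none (by intro t ht; cases ht) s hz
        simp [hs]
    | none =>
        cases hd : voices.foldl pvDStep none with
        | some t =>
            have ht : t ≠ "" := dfold_ne_empty voices none (by intro u hu; cases hu) t hd
            simp [ht]
        | none =>
            simp [fallback_eq]
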